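-- pv_equiv track=rewrite | github.com/luoxi1228/Supple | Application/run_experiments.py | nodeNum
-- ===== SOURCE A (Python) =====
-- def nodeNum(n, m, k):
--     """
--     递归计算二叉树中需要生成的布尔路由信息的总 bit 数
--     完全对齐 C++ 中的 nodeNum 逻辑
--     """
--     if k <= 1 or n == 0:
--         return 0
--     k_left = k // 2
--     k_right = k - k_left
--     s_left = min(n, m * k_left)
--     s_right = min(n, m * k_right)
--     return (2 * n) + nodeNum(s_left, m, k_left) + nodeNum(s_right, m, k_right)
-- ===== SOURCE B (Python) =====
-- def nodeNum(n, m, k):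
--     """Same total bit count, but memoised on (n, k): the recursion tree has
--     exponentially many nodes yet only a handful of distinct (n, k) states."""
--     cache = {}
--
--     def go(n, k):
--         if k <= 1 or n == 0:
--             return 0
--         key = (n, k)
--         hit = cache.get(key)
--         if hit is not None:
--             return hit
--         k_left = k // 2
--         k_right = k - k_left
--         res = 2 * n + go(min(n, m * k_left), k_left) + go(min(n, m * k_right), k_right)
--         cache[key] = res
--         return res
--
--     return go(n, k)
-- ===== Notes on version B (the rewrite author's own statement) =====
-- stated objective: faster
-- what changed: A re-solves the same (n,k) subproblem exponentially often down the binary split tree; B memoises the recursion on (n,k), of which only O(log k) distinct states occur, so each state is computed once.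
import Mathlib
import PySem

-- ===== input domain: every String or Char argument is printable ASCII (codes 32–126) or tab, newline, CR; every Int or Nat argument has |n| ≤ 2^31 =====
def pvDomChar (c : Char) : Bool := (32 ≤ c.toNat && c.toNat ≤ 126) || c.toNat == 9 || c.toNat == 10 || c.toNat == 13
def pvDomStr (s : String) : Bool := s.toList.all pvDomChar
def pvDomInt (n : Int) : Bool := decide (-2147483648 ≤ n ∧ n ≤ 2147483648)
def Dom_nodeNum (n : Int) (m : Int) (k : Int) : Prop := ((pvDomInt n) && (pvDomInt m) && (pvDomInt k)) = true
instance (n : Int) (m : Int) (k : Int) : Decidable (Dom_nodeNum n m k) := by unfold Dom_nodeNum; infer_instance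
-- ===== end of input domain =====

-- B memoises A's recursion on the key (n, k), computing each distinct state once; return values agree everywhere.

-- termination fact both recursions cite: for 2 ≤ k, k // 2 and k - k // 2 are in [1, k-1]
theorem pvHalfLt (k : Int) (hk : 2 ≤ k) :
    (PySem.Int.floordiv k 2).toNat < k.toNat ∧ (k - PySem.Int.floordiv k 2).toNat < k.toNat := by
  rw [PySem.Int.floordiv_eq_ediv_of_pos (by omega)]
  omega

-- ===== PORT A =====
def nodeNum (n : Int) (m : Int) (k : Int) : Int :=
  if k ≤ 1 ∨ n = 0 then 0
  else
    let k_left := PySem.Int.floordiv k 2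
    let k_right := k - k_left
    let s_left := min n (m * k_left)
    let s_right := min n (m * k_right)
    2 * n + nodeNum s_left m k_left + nodeNum s_right m k_right
termination_by k.toNat
decreasing_by
  · exact (pvHalfLt k (by omega)).1
  · exact (pvHalfLt k (by omega)).2

-- ===== PORT B =====
-- the mutable cache dict of Source B is threaded through the recursion as explicit state
def nodeNumGo (m : Int) (n : Int) (k : Int) (cache : PySem.Dict (Int × Int) Int) :
    Int × PySem.Dict (Int × Int) Int :=
  if k ≤ 1 ∨ n = 0 then (0, cache)
  else
    match cache.get? (n, k) with
    | some hit => (hit, cache)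
    | none =>
      let k_left := PySem.Int.floordiv k 2
      let k_right := k - k_left
      let r1 := nodeNumGo m (min n (m * k_left)) k_left cache
      let r2 := nodeNumGo m (min n (m * k_right)) k_right r1.2
      let res := 2 * n + r1.1 + r2.1
      (res, r2.2.insert (n, k) res)
termination_by k.toNat
decreasing_by
  · exact (pvHalfLt k (by omega)).1
  · exact (pvHalfLt k (by omega)).2

def nodeNum_alt (n : Int) (m : Int) (k : Int) : Int :=
  (nodeNumGo m n k PySem.Dict.empty).1

-- ===== PRECONDITION & SPEC =====
def Spec_nodeNum (n : Int) (m : Int) (k : Int) (out : Int) : Prop := out = nodeNum_alt n m k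
instance (n : Int) (m : Int) (k : Int) (out : Int) : Decidable (Spec_nodeNum n m k out) := by unfold Spec_nodeNum; infer_instance

-- ===== CLAIM (what is proved, stated in full; the proofs are below) =====
def Claim_equal_nodeNum : Prop := ∀ (n : Int) (m : Int) (k : Int), Dom_nodeNum n m k → Spec_nodeNum n m k (nodeNum n m k)

-- ===== LEMMAS AND PROOFS =====

-- cache invariant: every memo entry stores the value A computes for its key
def GoodCache (m : Int) (cache : PySem.Dict (Int × Int) Int) : Prop :=
  ∀ a b v, cache.get? (a, b) = some v → v = nodeNum a m b

theorem goodCache_empty (m : Int) : GoodCache m PySem.Dict.empty := by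
  intro a b v h
  simp [PySem.Dict.get?_empty] at h

theorem nodeNumGo_correct (m : Int) : ∀ (K : Nat) (n k : Int)
    (cache : PySem.Dict (Int × Int) Int), k.toNat < K → GoodCache m cache →
    (nodeNumGo m n k cache).1 = nodeNum n m k ∧ GoodCache m (nodeNumGo m n k cache).2 := by
  intro K
  induction K with
  | zero => intro n k cache h; omega
  | succ K ih =>
    intro n k cache hK hgood
    rw [nodeNumGo, nodeNum]
    by_cases hbase : k ≤ 1 ∨ n = 0
    · rw [if_pos hbase, if_pos hbase]
      exact ⟨rfl, hgood⟩
    · rw [if_neg hbase, if_neg hbase]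
      rcases hget : cache.get? (n, k) with _ | hit
      · -- cache miss: recurse on both children, then insert the result
        have hk2 : 2 ≤ k := by omega
        have hlt := pvHalfLt k hk2
        obtain ⟨h1, hc1⟩ := ih (min n (m * PySem.Int.floordiv k 2))
          (PySem.Int.floordiv k 2) cache (by omega) hgood
        obtain ⟨h2, hc2⟩ := ih (min n (m * (k - PySem.Int.floordiv k 2)))
          (k - PySem.Int.floordiv k 2) _ (by omega) hc1
        constructor
        · dsimp only
          rw [h1, h2]
        · dsimp only
          intro a b v hv
          rcases eq_or_ne ((a, b) : Int × Int) (n, k) with heq | hne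
          · injection heq with ha hb
            subst ha; subst hb
            rw [PySem.Dict.get?_insert_self] at hv
            injection hv with hv
            rw [← hv, nodeNum, if_neg hbase, h1, h2]
          · rw [PySem.Dict.get?_insert_of_ne _ _ hne] at hv
            exact hc2 a b v hv
      · -- cache hit: the invariant says the stored value is A's value
        have hhit := hgood n k hit hget
        rw [nodeNum, if_neg hbase] at hhit
        exact ⟨hhit, hgood⟩

-- ===== VERDICT (by name: the statement is the Claim_ definition above) =====
theorem nodeNum_spec : Claim_equal_nodeNum := by
  intro n m k _
  unfold Spec_nodeNum nodeNum_alt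
  exact ((nodeNumGo_correct m (k.toNat + 1) n k PySem.Dict.empty (by omega) (goodCache_empty m)).1).symm
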